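-- pv_equiv track=rewrite | github.com/alan-isaac/econpy | trunk/abm/gridworld/gridworld.py | moore_neighborhood
-- ===== SOURCE A (Python) =====
-- from operator import add, methodcaller
-- from itertools import imap, izip, starmap
-- from itertools import product as cartesian_product
--
-- def moore_neighborhood(radius, center=(0,0), keepcenter=False, aslist=True):
-- 	"""Return list or generator, the Moore neighborhood of the origin
-- 	(or equivalently. the Moore neighborhood of any point
-- 	as characterized by offsets from its location).
-- 	By default (center=(0,0)), uses (0,0) as 2d origin.
-- 	(Change the center dimension to change the dimension.)
-- 	By default (keepcenter=False), does not include origin.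
-- 	"""
-- 	offsets = range(-radius, radius+1)
-- 	dim = len(center)
-- 	hood = cartesian_product(offsets, repeat=dim)
-- 	if center != (0,)*dim:
-- 		hood = ( tuple(imap(add, center, nbr)) for nbr in hood )
-- 	if not keepcenter:
-- 		hood = (loc for loc in hood if loc != center)
-- 	if aslist:
-- 		hood = list(hood)
-- 	return hood
-- ===== SOURCE B (Python) =====
-- def moore_neighborhood(radius, center=(0,0), keepcenter=False, aslist=True):
--     """Emit the neighborhood as concentric Chebyshev rings (plus the center
--     when kept) and sort into lexicographic order: no per-cell center filter
--     and no cartesian product of the full square."""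
--     cx, cy = center
--     cells = []
--     if radius >= 0:
--         if keepcenter:
--             cells.append(center)
--         for k in range(1, radius + 1):
--             for x in range(cx - k, cx + k + 1):
--                 cells.append((x, cy - k))
--                 cells.append((x, cy + k))
--             for y in range(cy - k + 1, cy + k):
--                 cells.append((cx - k, y))
--                 cells.append((cx + k, y))
--     cells.sort()
--     return cells if aslist else (cell for cell in cells)
-- ===== Notes on version B (the rewrite author's own statement) =====
-- stated objective: alternative
-- what changed: B builds the neighborhood from concentric Chebyshev rings (k = 1..radius: top/bottom rows plus left/right columns, with the center appended only when kept) and then sorts the collected cells into lexicographic order, instead of A's cartesian product of the offset range followed by a tuple-add mapping generator and a center-filtering generator over the full square.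
import Mathlib
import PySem

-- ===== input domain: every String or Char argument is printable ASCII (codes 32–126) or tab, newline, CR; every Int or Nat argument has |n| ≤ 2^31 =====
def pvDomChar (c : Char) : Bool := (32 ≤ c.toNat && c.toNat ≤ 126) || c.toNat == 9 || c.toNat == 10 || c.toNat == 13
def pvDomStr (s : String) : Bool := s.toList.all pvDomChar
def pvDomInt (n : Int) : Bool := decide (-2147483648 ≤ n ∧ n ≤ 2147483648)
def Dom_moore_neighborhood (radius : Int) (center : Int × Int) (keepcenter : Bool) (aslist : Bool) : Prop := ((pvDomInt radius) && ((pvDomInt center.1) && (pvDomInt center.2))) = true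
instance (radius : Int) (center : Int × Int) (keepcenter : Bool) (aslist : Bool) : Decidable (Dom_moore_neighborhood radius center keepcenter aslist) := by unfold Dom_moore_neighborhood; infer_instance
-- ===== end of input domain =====

-- B replaces A's cartesian product + tuple-add map + center filter by building concentric
-- Chebyshev rings and sorting them lexicographically (objective: alternative algorithm).
-- aslist only picks list vs lazy iterator in Python; the value compared is the returned sequence.
-- ===== PORT A =====
-- A: product of the offset range with itself (lexicographic), then a tuple-add map
-- when the center is not the origin, then a filter dropping the center when
-- keepcenter is false.
def moore_neighborhood (radius : Int) (center : Int × Int) (keepcenter : Bool) (aslist : Bool) : List (Int × Int) :=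
  let offsets := PySem.List.pyRange (-radius) (radius + 1) 1
  let hood := offsets.flatMap (fun a => offsets.map (fun b => (a, b)))
  let hood := if center ≠ ((0 : Int), (0 : Int)) then
      hood.map (fun nbr => (center.1 + nbr.1, center.2 + nbr.2)) else hood
  let hood := if !keepcenter then hood.filter (fun loc => loc != center) else hood
  hood

-- ===== PORT B =====
-- B: collect the center (when kept) plus the concentric Chebyshev rings k = 1..radius
-- (top/bottom rows, then the two side columns), then sort lexicographically.
-- cells.sort() on 2-tuples of ints is PySem.List.sorted2 with the two component keys.
def moore_neighborhood_alt (radius : Int) (center : Int × Int) (keepcenter : Bool) (aslist : Bool) : List (Int × Int) :=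
  let cells : List (Int × Int) :=
    if 0 ≤ radius then
      (if keepcenter then [center] else []) ++
      (PySem.List.pyRange 1 (radius + 1) 1).flatMap (fun k =>
        (PySem.List.pyRange (center.1 - k) (center.1 + k + 1) 1).flatMap
          (fun x => [(x, center.2 - k), (x, center.2 + k)]) ++
        (PySem.List.pyRange (center.2 - k + 1) (center.2 + k) 1).flatMap
          (fun y => [(center.1 - k, y), (center.1 + k, y)]))
    else []
  PySem.List.sorted2 cells Prod.fst Prod.snd false

-- ===== PRECONDITION & SPEC =====
def Spec_moore_neighborhood (radius : Int) (center : Int × Int) (keepcenter : Bool) (aslist : Bool) (out : List (Int × Int)) : Prop := out = moore_neighborhood_alt radius center keepcenter aslist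
instance (radius : Int) (center : Int × Int) (keepcenter : Bool) (aslist : Bool) (out : List (Int × Int)) : Decidable (Spec_moore_neighborhood radius center keepcenter aslist out) := by unfold Spec_moore_neighborhood; infer_instance

-- ===== CLAIM =====
def Claim_equal_moore_neighborhood : Prop := ∀ (radius : Int) (center : Int × Int) (keepcenter : Bool) (aslist : Bool), Dom_moore_neighborhood radius center keepcenter aslist → Spec_moore_neighborhood radius center keepcenter aslist (moore_neighborhood radius center keepcenter aslist)

-- ===== LEMMAS AND PROOFS =====

-- A's full square of cells around (c1, c2), in A's lexicographic order
def pvSquare (r c1 c2 : Int) : List (Int × Int) :=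
  (PySem.List.pyRange (-r) (r + 1) 1).flatMap
    (fun a => (PySem.List.pyRange (-r) (r + 1) 1).map (fun b => (c1 + a, c2 + b)))

-- B's unsorted cell list (center part ++ rings), as a named helper
def pvCells (r c1 c2 : Int) (keep : Bool) : List (Int × Int) :=
  if 0 ≤ r then
    (if keep then [((c1 : Int), (c2 : Int))] else []) ++
    (PySem.List.pyRange 1 (r + 1) 1).flatMap (fun k =>
      (PySem.List.pyRange (c1 - k) (c1 + k + 1) 1).flatMap
        (fun x => [(x, c2 - k), (x, c2 + k)]) ++
      (PySem.List.pyRange (c2 - k + 1) (c2 + k) 1).flatMap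
        (fun y => [(c1 - k, y), (c1 + k, y)]))
  else []

-- the comparison sorted2 uses, specialised to component keys on Int × Int
def pvBefore (p q : Int × Int) : Bool :=
  decide (p.1 < q.1) || (!decide (q.1 < p.1) && decide (p.2 < q.2))

-- "p may stay before q in the sorted output"
def pvLe (p q : Int × Int) : Prop := pvBefore q p = false

-- strict lexicographic order
def pvLt (p q : Int × Int) : Prop := p.1 < q.1 ∨ (p.1 = q.1 ∧ p.2 < q.2)

theorem pvLt_le {p q : Int × Int} (h : pvLt p q) : pvLe p q := by
  obtain ⟨p1, p2⟩ := p; obtain ⟨q1, q2⟩ := q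
  simp [pvLt] at h
  simp [pvLe, pvBefore]; omega

theorem pvLe_antisymm {p q : Int × Int} (h1 : pvLe p q) (h2 : pvLe q p) : p = q := by
  obtain ⟨p1, p2⟩ := p; obtain ⟨q1, q2⟩ := q
  simp [pvLe, pvBefore] at h1 h2
  simp only [Prod.mk.injEq]; omega

theorem pvBefore_to_le {x y : Int × Int} (h : pvBefore x y = true) : pvLe x y := by
  obtain ⟨x1, x2⟩ := x; obtain ⟨y1, y2⟩ := y
  simp [pvBefore] at h; simp [pvLe, pvBefore]; omega

theorem pvBefore_le_trans {x y z : Int × Int} (h : pvBefore x y = true) (h2 : pvLe y z) : pvLe x z := by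
  obtain ⟨x1, x2⟩ := x; obtain ⟨y1, y2⟩ := y; obtain ⟨z1, z2⟩ := z
  simp [pvBefore] at h; simp [pvLe, pvBefore] at h2 ⊢; omega

-- insertion into a pvLe-pairwise list keeps it pvLe-pairwise
theorem insertBy_pairwise (x : Int × Int) (acc : List (Int × Int))
    (h : acc.Pairwise pvLe) : (PySem.List.insertBy pvBefore x acc).Pairwise pvLe := by
  induction acc with
  | nil => simp [PySem.List.insertBy]
  | cons y ys ih =>
    rw [List.pairwise_cons] at h
    obtain ⟨hy, hys⟩ := h
    by_cases hb : pvBefore x y = true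
    · rw [show PySem.List.insertBy pvBefore x (y :: ys) = x :: y :: ys from by
        simp [PySem.List.insertBy, hb]]
      refine List.pairwise_cons.2 ⟨?_, List.pairwise_cons.2 ⟨hy, hys⟩⟩
      intro z hz
      rcases List.mem_cons.1 hz with hz | hz
      · exact hz ▸ pvBefore_to_le hb
      · exact pvBefore_le_trans hb (hy z hz)
    · rw [show PySem.List.insertBy pvBefore x (y :: ys) = y :: PySem.List.insertBy pvBefore x ys from by
        simp [PySem.List.insertBy, hb]]
      refine List.pairwise_cons.2 ⟨?_, ih hys⟩
      intro z hz
      rcases (PySem.List.mem_insertBy pvBefore x z ys).1 hz with rfl | hz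
      · exact eq_false_of_ne_true hb
      · exact hy z hz

theorem foldl_insertBy_pairwise (xs acc : List (Int × Int)) (h : acc.Pairwise pvLe) :
    (xs.foldl (fun acc x => PySem.List.insertBy pvBefore x acc) acc).Pairwise pvLe := by
  induction xs generalizing acc with
  | nil => exact h
  | cons x xs ih => exact ih _ (insertBy_pairwise x acc h)

theorem sorted2_pairwise (xs : List (Int × Int)) :
    (PySem.List.sorted2 xs Prod.fst Prod.snd false).Pairwise pvLe := by
  have he : PySem.List.sorted2 xs Prod.fst Prod.snd false
      = xs.foldl (fun acc x => PySem.List.insertBy pvBefore x acc) [] := rfl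
  rw [he]
  exact foldl_insertBy_pairwise xs [] (by simp)

-- A in normal form: filtered square
theorem A_eq (r c1 c2 : Int) (keep al : Bool) :
    moore_neighborhood r (c1, c2) keep al
      = (pvSquare r c1 c2).filter (fun p => keep || p != (c1, c2)) := by
  have hstep : moore_neighborhood r (c1, c2) keep al
      = (if !keep then (pvSquare r c1 c2).filter (fun loc => loc != (c1, c2))
         else pvSquare r c1 c2) := by
    show (let offsets := PySem.List.pyRange (-r) (r + 1) 1
          let hood := offsets.flatMap (fun a => offsets.map (fun b => (a, b)))
          let hood := if ((c1 : Int), (c2 : Int)) ≠ ((0 : Int), (0 : Int)) then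
              hood.map (fun nbr => (c1 + nbr.1, c2 + nbr.2)) else hood
          if !keep then hood.filter (fun loc => loc != (c1, c2)) else hood) = _
    have hsq : (if ((c1 : Int), (c2 : Int)) ≠ ((0 : Int), (0 : Int)) then
        ((PySem.List.pyRange (-r) (r + 1) 1).flatMap
          (fun a => (PySem.List.pyRange (-r) (r + 1) 1).map (fun b => (a, b)))).map
            (fun nbr => (c1 + nbr.1, c2 + nbr.2))
        else (PySem.List.pyRange (-r) (r + 1) 1).flatMap
          (fun a => (PySem.List.pyRange (-r) (r + 1) 1).map (fun b => (a, b))))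
        = pvSquare r c1 c2 := by
      by_cases hc : ((c1 : Int), (c2 : Int)) = ((0 : Int), (0 : Int))
      · obtain ⟨h1, h2⟩ := Prod.mk.injEq .. ▸ hc
        subst h1; subst h2
        simp [pvSquare]
      · simp only [ne_eq, hc, not_false_eq_true, if_true, pvSquare, List.map_flatMap,
          List.map_map, Function.comp_def]
    simp only [hsq]
  rw [hstep]
  cases keep with
  | false => simp
  | true => simp [List.filter_true]

theorem B_eq (r c1 c2 : Int) (keep al : Bool) :
    moore_neighborhood_alt r (c1, c2) keep al
      = PySem.List.sorted2 (pvCells r c1 c2 keep) Prod.fst Prod.snd false := by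
  rfl

theorem square_pairwise (r c1 c2 : Int) : (pvSquare r c1 c2).Pairwise pvLt := by
  unfold pvSquare
  rw [List.pairwise_flatMap]
  constructor
  · intro a _
    rw [List.pairwise_map]
    refine (PySem.List.pairwise_lt_pyRange_one _ _).imp ?_
    intro b b' h
    exact Or.inr ⟨rfl, by omega⟩
  · refine (PySem.List.pairwise_lt_pyRange_one _ _).imp ?_
    intro a a' h x hx y hy
    simp only [List.mem_map] at hx hy
    obtain ⟨b, _, rfl⟩ := hx
    obtain ⟨b', _, rfl⟩ := hy
    exact Or.inl (by omega)

theorem mem_square (r c1 c2 : Int) (p : Int × Int) :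
    p ∈ pvSquare r c1 c2 ↔
      c1 - r ≤ p.1 ∧ p.1 ≤ c1 + r ∧ c2 - r ≤ p.2 ∧ p.2 ≤ c2 + r := by
  obtain ⟨p1, p2⟩ := p
  unfold pvSquare
  simp only [List.mem_flatMap, List.mem_map, PySem.List.mem_pyRange_one, Prod.mk.injEq]
  constructor
  · rintro ⟨a, ⟨ha1, ha2⟩, b, ⟨hb1, hb2⟩, h1, h2⟩
    omega
  · rintro ⟨h1, h2, h3, h4⟩
    exact ⟨p1 - c1, by omega, p2 - c2, by omega, by omega, by omega⟩

theorem pvLt_ne {p q : Int × Int} (h : pvLt p q) : p ≠ q := by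
  obtain ⟨p1, p2⟩ := p; obtain ⟨q1, q2⟩ := q
  simp [pvLt] at h; simp only [ne_eq, Prod.mk.injEq]; omega

-- ring membership: inside the k-box and on its boundary
theorem mem_ring (c1 c2 k : Int) (p : Int × Int) :
    (p ∈ (PySem.List.pyRange (c1 - k) (c1 + k + 1) 1).flatMap
        (fun x => [(x, c2 - k), (x, c2 + k)]) ++
      (PySem.List.pyRange (c2 - k + 1) (c2 + k) 1).flatMap
        (fun y => [(c1 - k, y), (c1 + k, y)]))
    ↔ ((c1 - k ≤ p.1 ∧ p.1 ≤ c1 + k ∧ c2 - k ≤ p.2 ∧ p.2 ≤ c2 + k) ∧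
       (p.1 = c1 - k ∨ p.1 = c1 + k ∨ p.2 = c2 - k ∨ p.2 = c2 + k)) := by
  obtain ⟨p1, p2⟩ := p
  simp only [List.mem_append, List.mem_flatMap, PySem.List.mem_pyRange_one,
    List.mem_cons, List.not_mem_nil, or_false, Prod.mk.injEq]
  constructor
  · rintro (⟨x, hx, h⟩ | ⟨y, hy, h⟩) <;> rcases h with ⟨rfl, rfl⟩ | ⟨rfl, rfl⟩ <;>
      exact ⟨by omega, by omega⟩
  · rintro ⟨⟨hb1, hb2, hb3, hb4⟩, hside⟩
    by_cases h2 : p2 = c2 - k ∨ p2 = c2 + k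
    · exact Or.inl ⟨p1, ⟨by omega, by omega⟩, by omega⟩
    · exact Or.inr ⟨p2, ⟨by omega, by omega⟩, by omega⟩

theorem nodup_ring (c1 c2 k : Int) (hk : 1 ≤ k) :
    ((PySem.List.pyRange (c1 - k) (c1 + k + 1) 1).flatMap
        (fun x => [(x, c2 - k), (x, c2 + k)]) ++
      (PySem.List.pyRange (c2 - k + 1) (c2 + k) 1).flatMap
        (fun y => [(c1 - k, y), (c1 + k, y)])).Nodup := by
  refine List.Nodup.append ?_ ?_ ?_
  · rw [List.nodup_flatMap]
    refine ⟨fun x _ => by simp; omega, ?_⟩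
    refine (PySem.List.pairwise_lt_pyRange_one _ _).imp ?_
    intro x x' h q hq hq'
    obtain ⟨q1, q2⟩ := q
    simp only [List.mem_cons, List.not_mem_nil, or_false, Prod.mk.injEq] at hq hq'
    omega
  · rw [List.nodup_flatMap]
    refine ⟨fun y _ => by simp; omega, ?_⟩
    refine (PySem.List.pairwise_lt_pyRange_one _ _).imp ?_
    intro y y' h q hq hq'
    obtain ⟨q1, q2⟩ := q
    simp only [List.mem_cons, List.not_mem_nil, or_false, Prod.mk.injEq] at hq hq'
    omega
  · intro q h1 h2
    obtain ⟨q1, q2⟩ := q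
    simp only [List.mem_flatMap, PySem.List.mem_pyRange_one, List.mem_cons,
      List.not_mem_nil, or_false, Prod.mk.injEq] at h1 h2
    obtain ⟨x, hx, hc⟩ := h1
    obtain ⟨y, hy, hc'⟩ := h2
    omega

theorem nodup_cells (r c1 c2 : Int) (keep : Bool) : (pvCells r c1 c2 keep).Nodup := by
  unfold pvCells
  split
  · refine List.Nodup.append ?_ ?_ ?_
    · split <;> simp
    · rw [List.nodup_flatMap]
      constructor
      · intro k hk
        exact nodup_ring c1 c2 k (PySem.List.mem_pyRange_one.1 hk).1
      · refine (PySem.List.pairwise_lt_pyRange_one _ _).imp ?_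
        intro k k' h q hq hq'
        have h1 := (mem_ring c1 c2 k q).1 hq
        have h2 := (mem_ring c1 c2 k' q).1 hq'
        obtain ⟨q1, q2⟩ := q
        simp only at h1 h2
        omega
    · intro q hq hflat
      obtain ⟨k, hk, hring⟩ := List.mem_flatMap.1 hflat
      have hk1 := (PySem.List.mem_pyRange_one.1 hk).1
      have h1 := (mem_ring c1 c2 k q).1 hring
      split at hq
      · rw [List.mem_singleton] at hq
        subst hq
        simp only at h1
        omega
      · simp at hq
  · simp

theorem mem_cells (r c1 c2 : Int) (keep : Bool) (p : Int × Int) :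
    p ∈ pvCells r c1 c2 keep ↔
      0 ≤ r ∧ ((keep = true ∧ p = (c1, c2)) ∨
        ∃ k, 1 ≤ k ∧ k ≤ r ∧
          (c1 - k ≤ p.1 ∧ p.1 ≤ c1 + k ∧ c2 - k ≤ p.2 ∧ p.2 ≤ c2 + k) ∧
          (p.1 = c1 - k ∨ p.1 = c1 + k ∨ p.2 = c2 - k ∨ p.2 = c2 + k)) := by
  constructor
  · intro h
    unfold pvCells at h
    split at h
    · rename_i hr
      refine ⟨hr, ?_⟩
      rcases List.mem_append.1 h with h | h
      · left
        split at h
        · rename_i hkeep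
          exact ⟨hkeep, List.mem_singleton.1 h⟩
        · simp at h
      · right
        obtain ⟨k, hk, hring⟩ := List.mem_flatMap.1 h
        obtain ⟨h1, h2⟩ := PySem.List.mem_pyRange_one.1 hk
        exact ⟨k, h1, by omega, (mem_ring c1 c2 k p).1 hring⟩
    · simp at h
  · rintro ⟨hr, hcase⟩
    unfold pvCells
    rw [if_pos hr]
    rcases hcase with ⟨hkeep, rfl⟩ | ⟨k, hk1, hk2, hring⟩
    · exact List.mem_append_left _ (by rw [hkeep]; simp)
    · exact List.mem_append_right _ (List.mem_flatMap.2
        ⟨k, PySem.List.mem_pyRange_one.2 ⟨hk1, by omega⟩, (mem_ring c1 c2 k p).2 hring⟩)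

theorem cells_perm (r c1 c2 : Int) (keep : Bool) :
    (pvCells r c1 c2 keep).Perm
      ((pvSquare r c1 c2).filter (fun p => keep || p != (c1, c2))) := by
  rw [List.perm_ext_iff_of_nodup (nodup_cells r c1 c2 keep)
    (((square_pairwise r c1 c2).imp pvLt_ne).filter _)]
  intro p
  rw [mem_cells, List.mem_filter, mem_square]
  obtain ⟨p1, p2⟩ := p
  simp only [Bool.or_eq_true, bne_iff_ne, ne_eq, Prod.mk.injEq, not_and]
  constructor
  · rintro ⟨hr, ⟨hkeep, hp⟩ | ⟨k, hk1, hk2, ⟨b1, b2, b3, b4⟩, hside⟩⟩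
    · obtain ⟨h1, h2⟩ := Prod.mk.injEq .. ▸ hp
      exact ⟨⟨by omega, by omega, by omega, by omega⟩, Or.inl hkeep⟩
    · exact ⟨⟨by omega, by omega, by omega, by omega⟩, Or.inr (by omega)⟩
  · rintro ⟨⟨b1, b2, b3, b4⟩, hpred⟩
    refine ⟨by omega, ?_⟩
    by_cases hc : p1 = c1 ∧ p2 = c2
    · rcases hpred with hk | hne
      · exact Or.inl ⟨hk, hc⟩
      · exact absurd hc.2 (hne hc.1)
    · exact Or.inr ⟨max (max (p1 - c1) (c1 - p1)) (max (p2 - c2) (c2 - p2)),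
        by omega, by omega, ⟨by omega, by omega, by omega, by omega⟩, by omega⟩

-- ===== VERDICT =====
theorem moore_neighborhood_spec : Claim_equal_moore_neighborhood := by
  intro r c keep al _
  obtain ⟨c1, c2⟩ := c
  unfold Spec_moore_neighborhood
  rw [A_eq, B_eq]
  refine (List.Perm.eq_of_pairwise (le := pvLe) (fun a b _ _ h1 h2 => pvLe_antisymm h1 h2) ?_ ?_ ?_).symm
  · exact sorted2_pairwise _
  · exact ((square_pairwise r c1 c2).imp (fun h => pvLt_le h)).filter _
  · exact ((PySem.List.sorted2_perm _ _ _ _).trans (cells_perm r c1 c2 keep))
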